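-- pv_equiv track=rewrite | github.com/Wicirelllis/miem-docs | ИТСС/7-8 ОПИСиС/hw_2/hw_2.py | bipolar_encoding
-- ===== SOURCE A (Python) =====
-- from typing import Callable, List
--
-- def bipolar_encoding(samples: List[int]) -> List[int]:
--     """Perform bipolar encoding for physical level."""
--     res = []
--     last = -1
--     for sample in samples:
--         if sample == 0:
--             res.append(0)
--         else:
--             last *= -1
--             res.append(last)
--     return res
-- ===== SOURCE B (Python) =====
-- from typing import List
--
-- def bipolar_encoding(samples: List[int]) -> List[int]:
--     """Bipolar encoding: locate nonzero samples, then fill by parity of their ordinal."""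
--     nonzero_positions = [i for i, s in enumerate(samples) if s != 0]
--     res = [0] * len(samples)
--     for k, idx in enumerate(nonzero_positions):
--         res[idx] = 1 if k % 2 == 0 else -1
--     return res
-- ===== Notes on version B (the rewrite author's own statement) =====
-- stated objective: alternative
-- what changed: Replaces the stateful sign-toggle single pass with two differently-shaped passes: first collect the indices of nonzero samples, then fill a zero-initialised result assigning +1/-1 by the parity of each nonzero's ordinal position.
import Mathlib
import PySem

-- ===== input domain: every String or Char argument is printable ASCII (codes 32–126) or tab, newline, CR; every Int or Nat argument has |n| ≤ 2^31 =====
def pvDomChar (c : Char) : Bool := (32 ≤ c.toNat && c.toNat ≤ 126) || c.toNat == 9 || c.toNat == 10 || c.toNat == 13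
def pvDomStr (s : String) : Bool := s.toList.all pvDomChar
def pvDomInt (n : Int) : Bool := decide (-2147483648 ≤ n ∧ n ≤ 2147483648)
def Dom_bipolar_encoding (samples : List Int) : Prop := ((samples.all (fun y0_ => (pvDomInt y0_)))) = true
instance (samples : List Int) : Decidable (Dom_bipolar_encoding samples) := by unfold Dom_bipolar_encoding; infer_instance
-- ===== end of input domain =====

-- B is an alternative decomposition: it first collects the indices of the nonzero
-- samples and then fills a zero-initialised list by the parity of their ordinal;
-- A toggles a sign variable in a single stateful pass. Same cost, different shape.

-- ===== PORT A =====
-- literal port of A: one pass, accumulator (res, last); `last *= -1` then append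
def bipolar_encoding (samples : List Int) : List Int :=
  (samples.foldl
    (fun (st : List Int × Int) sample =>
      if sample = 0 then (st.1 ++ [(0 : Int)], st.2)
      else (st.1 ++ [st.2 * -1], st.2 * -1))
    ([], -1)).1

-- ===== PORT B =====
-- Python `enumerate(xs, start=k)` (here always k = 0)
def pvEnumFrom {α : Type} (k : Nat) : List α → List (Nat × α)
  | [] => []
  | a :: l => (k, a) :: pvEnumFrom (k + 1) l

def bipolar_encoding_alt (samples : List Int) : List Int :=
  let nonzero_positions := ((pvEnumFrom 0 samples).filter (fun p => p.2 != 0)).map Prod.fst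
  let res := List.replicate samples.length (0 : Int)
  (pvEnumFrom 0 nonzero_positions).foldl
    (fun res p => res.set p.2 (if p.1 % 2 == 0 then (1 : Int) else -1)) res

-- ===== PRECONDITION & SPEC =====
def Spec_bipolar_encoding (samples : List Int) (out : List Int) : Prop := out = bipolar_encoding_alt samples
instance (samples : List Int) (out : List Int) : Decidable (Spec_bipolar_encoding samples out) := by unfold Spec_bipolar_encoding; infer_instance

-- ===== CLAIM (what is proved, stated in full; the proofs are below) =====
def Claim_equal_bipolar_encoding : Prop := ∀ (samples : List Int), Dom_bipolar_encoding samples → Spec_bipolar_encoding samples (bipolar_encoding samples)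

-- ===== LEMMAS AND PROOFS =====

-- common reference: the encoded list as a structural recursion carrying `last`
def pvModel : List Int → Int → List Int
  | [], _ => []
  | s :: rest, last =>
      if s = 0 then 0 :: pvModel rest last else (-last) :: pvModel rest (-last)

-- sign carried after k nonzeros have been emitted
def pvL (k : Nat) : Int := if k % 2 == 0 then -1 else 1

lemma pvL_succ (k : Nat) : pvL (k + 1) = -pvL k := by
  unfold pvL
  rcases Nat.even_or_odd k with h | h
  · have h2 : k % 2 = 0 := Nat.even_iff.mp h
    simp [Nat.add_mod, h2]
  · have h2 : k % 2 = 1 := Nat.odd_iff.mp h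
    simp [Nat.add_mod, h2]

-- A's fold equals acc ++ model
lemma pvA_fold (samples : List Int) : ∀ (acc : List Int) (last : Int),
    (samples.foldl
      (fun (st : List Int × Int) sample =>
        if sample = 0 then (st.1 ++ [(0 : Int)], st.2)
        else (st.1 ++ [st.2 * -1], st.2 * -1))
      (acc, last)).1 = acc ++ pvModel samples last := by
  induction samples with
  | nil => intro acc last; simp [pvModel]
  | cons s rest ih =>
      intro acc last
      rw [List.foldl_cons]
      by_cases hs : s = 0
      · rw [if_pos hs, ih]
        simp [pvModel, hs]
      · rw [if_neg hs, ih]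
        have hm : last * -1 = -last := by ring
        simp [pvModel, hs, hm]

lemma pvEnumFrom_map {α β : Type} (f : α → β) (l : List α) : ∀ k,
    pvEnumFrom k (l.map f) = (pvEnumFrom k l).map (fun p => (p.1, f p.2)) := by
  induction l with
  | nil => intro k; simp [pvEnumFrom]
  | cons a l ih => intro k; simp [pvEnumFrom, ih]

lemma pvEnumFrom_shift {α : Type} (l : List α) : ∀ k,
    pvEnumFrom (k + 1) l = (pvEnumFrom k l).map (fun p => (p.1 + 1, p.2)) := by
  induction l with
  | nil => intro k; simp [pvEnumFrom]
  | cons a l ih => intro k; simp [pvEnumFrom, ih]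

-- the nonzero-index list of samples (what B's first pass computes)
def pvNz (samples : List Int) : List Nat :=
  ((pvEnumFrom 0 samples).filter (fun p => p.2 != 0)).map Prod.fst

lemma pvNz_cons_zero (rest : List Int) :
    pvNz ((0 : Int) :: rest) = (pvNz rest).map (· + 1) := by
  unfold pvNz
  simp [pvEnumFrom, pvEnumFrom_shift, List.filter_map, List.map_map]
  rfl

lemma pvNz_cons_nonzero (s : Int) (hs : s ≠ 0) (rest : List Int) :
    pvNz (s :: rest) = 0 :: (pvNz rest).map (· + 1) := by
  unfold pvNz
  simp [pvEnumFrom, hs, pvEnumFrom_shift, List.filter_map, List.map_map]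
  rfl

-- B's fill loop
def pvFill (base : List Int) (ps : List (Nat × Nat)) : List Int :=
  ps.foldl (fun res p => res.set p.2 (if p.1 % 2 == 0 then (1 : Int) else -1)) base

lemma pvFill_shift (ps : List (Nat × Nat)) : ∀ (a : Int) (base : List Int),
    pvFill (a :: base) (ps.map (fun p => (p.1, p.2 + 1))) = a :: pvFill base ps := by
  induction ps with
  | nil => intro a base; simp [pvFill]
  | cons p ps ih =>
      intro a base
      simp [pvFill, List.foldl_cons] at ih ⊢
      exact ih a _

-- value B assigns at enumeration counter k
lemma pvVal (k : Nat) : (if k % 2 == 0 then (1 : Int) else -1) = pvL (k + 1) := by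
  rw [pvL_succ]; unfold pvL
  rcases Nat.even_or_odd k with h | h
  · simp [Nat.even_iff.mp h]
  · simp [Nat.odd_iff.mp h]

-- main invariant: the fill of the nonzero indices, enumerated from k, is the model with sign pvL k
lemma pvMain (samples : List Int) : ∀ k,
    pvFill (List.replicate samples.length 0) (pvEnumFrom k (pvNz samples))
      = pvModel samples (pvL k) := by
  induction samples with
  | nil => intro k; simp [pvNz, pvEnumFrom, pvFill, pvModel]
  | cons s rest ih =>
      intro k
      by_cases hs : s = 0
      · subst hs
        rw [pvNz_cons_zero, pvEnumFrom_map, List.length_cons, List.replicate_succ,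
          pvFill_shift, ih]
        simp [pvModel]
      · rw [pvNz_cons_nonzero s hs, List.length_cons, List.replicate_succ]
        have hstep : pvFill ((0 : Int) :: List.replicate rest.length 0)
            (pvEnumFrom k (0 :: (pvNz rest).map (· + 1)))
            = pvFill ((if k % 2 == 0 then (1 : Int) else -1) :: List.replicate rest.length 0)
                (pvEnumFrom (k + 1) ((pvNz rest).map (· + 1))) := by
          simp [pvEnumFrom, pvFill]
        rw [hstep, pvEnumFrom_map, pvFill_shift, ih, pvVal, pvModel]
        rw [if_neg hs, ← pvL_succ]

-- ===== VERDICT (by name: the statement is the Claim_ definition above) =====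
theorem bipolar_encoding_spec : Claim_equal_bipolar_encoding := by
  intro samples _
  unfold Spec_bipolar_encoding bipolar_encoding bipolar_encoding_alt
  rw [pvA_fold]
  have := pvMain samples 0
  simp only [pvFill, pvNz, pvL] at this
  simpa using this.symm
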